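-- pv_equiv track=rewrite | github.com/Kedylind/ai-study-videos | web/views.py | _get_completed_steps_from_progress
-- ===== SOURCE A (Python) =====
-- def _get_completed_steps_from_progress(progress_percent: int) -> list:
--     """Convert progress percent to list of completed step names."""
--     steps = [
--         ("fetch-paper", 20),
--         ("generate-script", 40),
--         ("generate-audio", 60),
--         ("generate-videos", 80),
--         ("add-captions", 100),
--     ]
--
--     completed_steps = []
--     for step_name, step_percent in steps:
--         if progress_percent >= step_percent:
--             completed_steps.append(step_name)
--
--     return completed_steps
-- ===== SOURCE B (Python) =====
-- import bisect
--
-- def _get_completed_steps_from_progress(progress_percent: int) -> list: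
--     """Convert progress percent to list of completed step names."""
--     names = ["fetch-paper", "generate-script", "generate-audio",
--              "generate-videos", "add-captions"]
--     thresholds = [20, 40, 60, 80, 100]
--     return names[:bisect.bisect_right(thresholds, progress_percent)]
-- ===== Notes on version B (the rewrite author's own statement) =====
-- stated objective: simpler
-- what changed: Replaced the per-step compare-and-append loop by computing the number of completed steps with bisect_right on the sorted thresholds and returning a prefix slice of the names list.
import Mathlib
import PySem

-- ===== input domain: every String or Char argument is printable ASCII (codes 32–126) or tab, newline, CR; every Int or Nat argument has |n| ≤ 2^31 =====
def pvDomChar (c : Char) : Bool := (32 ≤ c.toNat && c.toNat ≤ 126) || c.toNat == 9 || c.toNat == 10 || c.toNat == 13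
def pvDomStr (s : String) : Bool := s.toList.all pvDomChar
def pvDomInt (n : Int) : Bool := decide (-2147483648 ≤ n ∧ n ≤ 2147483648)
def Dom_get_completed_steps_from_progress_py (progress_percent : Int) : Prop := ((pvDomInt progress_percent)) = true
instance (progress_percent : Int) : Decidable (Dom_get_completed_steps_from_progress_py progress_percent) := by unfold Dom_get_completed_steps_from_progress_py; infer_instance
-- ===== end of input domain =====

-- B computes the count of completed steps via bisect_right on the sorted thresholds and
-- returns a prefix slice of the names list, replacing A's compare-and-append loop (objective: simpler).


-- ===== PORT A =====
-- literal transliteration: build `completed_steps` by folding over the (name, threshold) table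
def get_completed_steps_from_progress_py (progress_percent : Int) : List String :=
  let steps : List (String × Int) :=
    [("fetch-paper", 20), ("generate-script", 40), ("generate-audio", 60),
     ("generate-videos", 80), ("add-captions", 100)]
  steps.foldl
    (fun completed_steps sp =>
      if progress_percent ≥ sp.2 then completed_steps ++ [sp.1] else completed_steps)
    []

-- ===== PORT B =====
-- bisect.bisect_right on a sorted list = length of the ≤-prefix; names[:count] = List.take
def get_completed_steps_from_progress_py_alt (progress_percent : Int) : List String :=
  let names : List String :=
    ["fetch-paper", "generate-script", "generate-audio", "generate-videos", "add-captions"]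
  let thresholds : List Int := [20, 40, 60, 80, 100]
  names.take (thresholds.takeWhile (fun t => t ≤ progress_percent)).length

-- ===== PRECONDITION & SPEC =====
def Spec_get_completed_steps_from_progress_py (progress_percent : Int) (out : List String) : Prop := out = get_completed_steps_from_progress_py_alt progress_percent
instance (progress_percent : Int) (out : List String) : Decidable (Spec_get_completed_steps_from_progress_py progress_percent out) := by unfold Spec_get_completed_steps_from_progress_py; infer_instance

-- ===== CLAIM (what is proved, stated in full; the proofs are below) =====
def Claim_equal_get_completed_steps_from_progress_py : Prop := ∀ (progress_percent : Int), Dom_get_completed_steps_from_progress_py progress_percent → Spec_get_completed_steps_from_progress_py progress_percent (get_completed_steps_from_progress_py progress_percent)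

-- ===== LEMMAS AND PROOFS =====

-- ===== VERDICT (by name: the statement is the Claim_ definition above) =====
theorem get_completed_steps_from_progress_py_spec : Claim_equal_get_completed_steps_from_progress_py := by
  intro p _
  unfold Spec_get_completed_steps_from_progress_py
  unfold get_completed_steps_from_progress_py get_completed_steps_from_progress_py_alt
  simp only [List.foldl, List.takeWhile]
  by_cases h1 : (20 : Int) ≤ p <;> by_cases h2 : (40 : Int) ≤ p <;>
    by_cases h3 : (60 : Int) ≤ p <;> by_cases h4 : (80 : Int) ≤ p <;>
    by_cases h5 : (100 : Int) ≤ p <;>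
    simp [h1, h2, h3, h4, h5] <;> omega
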